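-- pv_equiv track=rewrite | github.com/bluechen8/cs265-bril | tasks/task4/memopt.py | merge_ptr_dict
-- ===== SOURCE A (Python) =====
-- def merge_ptr_dict(dicts):
--     if len(dicts) == 0:
--         return dict()
--     # extract all keys from list of dicts
--     all_keys = set()
--     for d in dicts:
--         all_keys |= set(d.keys())
--     # union w.r.t. each key
--     union_dict = dict()
--     for key in all_keys:
--         union_dict[key] = set()
--         for d in dicts:
--             if key in d:
--                 union_dict[key].update(d[key])
--     return union_dict
-- ===== SOURCE B (Python) =====
-- def merge_ptr_dict(dicts):
--     union_dict = {}
--     for d in dicts: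
--         for key, vals in d.items():
--             union_dict.setdefault(key, set()).update(vals)
--     return union_dict
-- ===== Notes on version B (the rewrite author's own statement) =====
-- stated objective: faster
-- what changed: Instead of collecting all keys first and then re-scanning the whole list of dicts once per key, B makes a single pass over each dict's items, accumulating the per-key union via setdefault.
import Mathlib
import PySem

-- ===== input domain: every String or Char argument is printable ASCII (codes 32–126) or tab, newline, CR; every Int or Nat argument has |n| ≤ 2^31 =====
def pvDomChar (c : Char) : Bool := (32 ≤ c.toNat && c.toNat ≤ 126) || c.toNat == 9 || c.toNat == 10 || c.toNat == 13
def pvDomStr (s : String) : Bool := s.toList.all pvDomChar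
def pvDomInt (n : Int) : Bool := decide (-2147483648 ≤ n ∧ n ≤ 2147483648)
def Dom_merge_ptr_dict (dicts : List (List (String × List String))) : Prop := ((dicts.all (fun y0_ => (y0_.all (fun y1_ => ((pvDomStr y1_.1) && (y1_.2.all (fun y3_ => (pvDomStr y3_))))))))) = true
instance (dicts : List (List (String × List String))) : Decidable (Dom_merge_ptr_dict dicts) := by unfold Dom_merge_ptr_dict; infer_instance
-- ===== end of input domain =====

-- B replaces A's per-key rescans of the whole dict list by one pass over each dict's items, accumulating unions via setdefault (objective: faster).
-- The returned Python dict's key order is set/hash-iteration order in A; dict outputs are compared ignoring order, the ports use first-occurrence order.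

-- ===== PORT A =====
def merge_ptr_dict (dicts : List (List (String × List String))) : List (String × List String) :=
  if dicts.length = 0 then [] else
  -- all_keys = set(); for d in dicts: all_keys |= set(d.keys())
  let all_keys : PySem.Set String :=
    dicts.foldl (fun s d => PySem.Set.union s (PySem.Dict.mk d).keys) PySem.Set.empty
  -- for key in all_keys: union_dict[key] = set(); for d in dicts: if key in d: union_dict[key].update(d[key])
  let union_dict : PySem.Dict String (List String) :=
    all_keys.foldl (fun u key =>
      dicts.foldl (fun u2 d =>
        if (PySem.Dict.mk d).contains key then
          u2.modify key PySem.Set.empty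
            (fun s => PySem.Set.update s ((PySem.Dict.mk d).getD key PySem.Set.empty))
        else u2)
        (u.insert key PySem.Set.empty))
      PySem.Dict.empty
  union_dict.items

-- ===== PORT B =====
def merge_ptr_dict_alt (dicts : List (List (String × List String))) : List (String × List String) :=
  -- union_dict = {}; for d in dicts: for key, vals in d.items(): union_dict.setdefault(key, set()).update(vals)
  (dicts.foldl (fun u d =>
      d.foldl (fun u2 kv =>
          u2.insert kv.1 (PySem.Set.update (u2.getD kv.1 PySem.Set.empty) kv.2)) u)
    (PySem.Dict.empty : PySem.Dict String (List String))).items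

-- ===== PRECONDITION & SPEC =====
-- Pre_ only requires each inner association list to have distinct keys, i.e. to actually represent a
-- Python dict (a Python dict can never hold the same key twice), so nothing A accepts is excluded.
def Pre_merge_ptr_dict (dicts : List (List (String × List String))) : Prop :=
  ∀ d ∈ dicts, (d.map Prod.fst).Nodup
instance (dicts : List (List (String × List String))) : Decidable (Pre_merge_ptr_dict dicts) := by
  unfold Pre_merge_ptr_dict; infer_instance
def pvWitness_merge_ptr_dict : (List (List (String × List String))) :=
  [[("a", ["x"])], [("a", ["y"]), ("b", [])]]

def Spec_merge_ptr_dict (dicts : List (List (String × List String))) (out : List (String × List String)) : Prop := out = merge_ptr_dict_alt dicts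
instance (dicts : List (List (String × List String))) (out : List (String × List String)) : Decidable (Spec_merge_ptr_dict dicts out) := by unfold Spec_merge_ptr_dict; infer_instance

-- ===== CLAIM (what is proved, stated in full; the proofs are below) =====
def Claim_equal_merge_ptr_dict : Prop := ∀ (dicts : List (List (String × List String))), Dom_merge_ptr_dict dicts → Pre_merge_ptr_dict dicts → Spec_merge_ptr_dict dicts (merge_ptr_dict dicts)

-- ===== LEMMAS AND PROOFS =====

-- the union over all dicts of the value at key k, in accumulation order (shared characterisation)
def vVal (dicts : List (List (String × List String))) (k : String) : PySem.Set String :=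
  dicts.foldl (fun s d =>
    if (PySem.Dict.mk d).contains k then
      PySem.Set.update s ((PySem.Dict.mk d).getD k PySem.Set.empty)
    else s) PySem.Set.empty

-- the keys in first-occurrence order (A's all_keys)
def vK (dicts : List (List (String × List String))) : PySem.Set String :=
  dicts.foldl (fun s d => PySem.Set.union s (PySem.Dict.mk d).keys) PySem.Set.empty

lemma vK_nodup (dicts : List (List (String × List String))) : (vK dicts).Nodup := by
  have h : ∀ (ds : List (List (String × List String))) (s : PySem.Set String), s.Nodup →
      (ds.foldl (fun s d => PySem.Set.union s (PySem.Dict.mk d).keys) s).Nodup := by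
    intro ds
    induction ds with
    | nil => intro s hs; exact hs
    | cons d ds ih => intro s hs; exact ih _ (PySem.Set.nodup_union _ _ hs)
  exact h dicts _ List.nodup_nil

-- ===== A-side lemmas =====

lemma aInner_getD_ne (dicts : List (List (String × List String))) (key k : String)
    (hne : k ≠ key) (u : PySem.Dict String (List String)) :
    (dicts.foldl (fun u2 d =>
        if (PySem.Dict.mk d).contains key then
          u2.modify key PySem.Set.empty
            (fun s => PySem.Set.update s ((PySem.Dict.mk d).getD key PySem.Set.empty))
        else u2) u).getD k PySem.Set.empty = u.getD k PySem.Set.empty := by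
  induction dicts generalizing u with
  | nil => rfl
  | cons d ds ih =>
    simp only [List.foldl_cons]
    split_ifs with hc
    · rw [ih, PySem.Dict.getD_modify_of_ne _ _ _ hne]
    · exact ih u

lemma aInner_getD_self (dicts : List (List (String × List String))) (key : String)
    (u : PySem.Dict String (List String)) :
    (dicts.foldl (fun u2 d =>
        if (PySem.Dict.mk d).contains key then
          u2.modify key PySem.Set.empty
            (fun s => PySem.Set.update s ((PySem.Dict.mk d).getD key PySem.Set.empty))
        else u2) u).getD key PySem.Set.empty
      = dicts.foldl (fun s d =>
          if (PySem.Dict.mk d).contains key then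
            PySem.Set.update s ((PySem.Dict.mk d).getD key PySem.Set.empty)
          else s) (u.getD key PySem.Set.empty) := by
  induction dicts generalizing u with
  | nil => rfl
  | cons d ds ih =>
    simp only [List.foldl_cons]
    split_ifs with hc
    · rw [ih, PySem.Dict.getD_modify_self]
    · exact ih u

lemma aInner_keys (dicts : List (List (String × List String))) (key : String)
    (u : PySem.Dict String (List String)) (h : u.contains key = true) :
    (dicts.foldl (fun u2 d =>
        if (PySem.Dict.mk d).contains key then
          u2.modify key PySem.Set.empty
            (fun s => PySem.Set.update s ((PySem.Dict.mk d).getD key PySem.Set.empty))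
        else u2) u).keys = u.keys := by
  induction dicts generalizing u with
  | nil => rfl
  | cons d ds ih =>
    simp only [List.foldl_cons]
    split_ifs with hc
    · rw [ih _ (by simp [PySem.Dict.modify])]
      simp [PySem.Dict.modify, PySem.Dict.keys_insert_of_contains _ _ h]
    · exact ih u h

lemma aBody_keys (dicts : List (List (String × List String))) (key : String)
    (u : PySem.Dict String (List String)) :
    (dicts.foldl (fun u2 d =>
        if (PySem.Dict.mk d).contains key then
          u2.modify key PySem.Set.empty
            (fun s => PySem.Set.update s ((PySem.Dict.mk d).getD key PySem.Set.empty))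
        else u2) (u.insert key PySem.Set.empty)).keys = PySem.Set.add u.keys key := by
  rw [aInner_keys _ _ _ (PySem.Dict.contains_insert_self u key PySem.Set.empty)]
  by_cases h : u.contains key = true
  · rw [PySem.Dict.keys_insert_of_contains _ _ h,
      PySem.Set.add_of_mem ((PySem.Dict.contains_iff_mem_keys u key).1 h)]
  · rw [PySem.Dict.keys_insert_of_not_contains _ _ (by simpa using h),
      PySem.Set.add_of_not_mem (fun hm => h ((PySem.Dict.contains_iff_mem_keys u key).2 hm))]

lemma aFold_keys (dicts : List (List (String × List String))) (L : List String)
    (u : PySem.Dict String (List String)) :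
    (L.foldl (fun u key =>
        dicts.foldl (fun u2 d =>
          if (PySem.Dict.mk d).contains key then
            u2.modify key PySem.Set.empty
              (fun s => PySem.Set.update s ((PySem.Dict.mk d).getD key PySem.Set.empty))
          else u2) (u.insert key PySem.Set.empty)) u).keys
      = PySem.Set.update u.keys L := by
  induction L generalizing u with
  | nil => rfl
  | cons key rest ih =>
    simp only [List.foldl_cons]
    rw [ih, aBody_keys, ← PySem.Set.update_cons]

lemma aFold_getD_not_mem (dicts : List (List (String × List String))) (L : List String)
    (k : String) (hk : k ∉ L) (u : PySem.Dict String (List String)) :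
    (L.foldl (fun u key =>
        dicts.foldl (fun u2 d =>
          if (PySem.Dict.mk d).contains key then
            u2.modify key PySem.Set.empty
              (fun s => PySem.Set.update s ((PySem.Dict.mk d).getD key PySem.Set.empty))
          else u2) (u.insert key PySem.Set.empty)) u).getD k PySem.Set.empty
      = u.getD k PySem.Set.empty := by
  induction L generalizing u with
  | nil => rfl
  | cons key rest ih =>
    have hne : k ≠ key := fun h => hk (by simp [h])
    simp only [List.foldl_cons]
    rw [ih (fun h => hk (List.mem_cons_of_mem _ h)),
      aInner_getD_ne _ _ _ hne, PySem.Dict.getD_insert_of_ne _ _ _ hne]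

lemma aFold_getD (dicts : List (List (String × List String))) (L : List String)
    (k : String) (hL : L.Nodup) (hk : k ∈ L) (u : PySem.Dict String (List String)) :
    (L.foldl (fun u key =>
        dicts.foldl (fun u2 d =>
          if (PySem.Dict.mk d).contains key then
            u2.modify key PySem.Set.empty
              (fun s => PySem.Set.update s ((PySem.Dict.mk d).getD key PySem.Set.empty))
          else u2) (u.insert key PySem.Set.empty)) u).getD k PySem.Set.empty
      = vVal dicts k := by
  induction L generalizing u with
  | nil => exact absurd hk (List.not_mem_nil)
  | cons key rest ih =>
    rcases List.nodup_cons.mp hL with ⟨hnm, hrest⟩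
    simp only [List.foldl_cons]
    rcases List.mem_cons.mp hk with rfl | hmem
    · rw [aFold_getD_not_mem dicts rest k hnm, aInner_getD_self,
        PySem.Dict.getD_insert_self]
      rfl
    · exact ih hrest hmem _

-- ===== B-side lemmas =====

lemma bInner_getD_not_mem (d : List (String × List String)) (k : String)
    (h : k ∉ d.map Prod.fst) (u : PySem.Dict String (List String)) :
    (d.foldl (fun u2 kv =>
        u2.insert kv.1 (PySem.Set.update (u2.getD kv.1 PySem.Set.empty) kv.2)) u).getD k PySem.Set.empty
      = u.getD k PySem.Set.empty := by
  induction d generalizing u with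
  | nil => rfl
  | cons kv rest ih =>
    have hne : k ≠ kv.1 := fun he => h (by simp [he])
    simp only [List.foldl_cons]
    rw [ih (fun hm => h (by simp at hm ⊢; exact Or.inr hm)),
      PySem.Dict.getD_insert_of_ne _ _ _ hne]

lemma bInner_getD (d : List (String × List String)) (k : String)
    (hnd : (d.map Prod.fst).Nodup) (u : PySem.Dict String (List String)) :
    (d.foldl (fun u2 kv =>
        u2.insert kv.1 (PySem.Set.update (u2.getD kv.1 PySem.Set.empty) kv.2)) u).getD k PySem.Set.empty
      = if (PySem.Dict.mk d).contains k then
          PySem.Set.update (u.getD k PySem.Set.empty) ((PySem.Dict.mk d).getD k PySem.Set.empty)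
        else u.getD k PySem.Set.empty := by
  induction d generalizing u with
  | nil => simp [PySem.Dict.contains]
  | cons kv rest ih =>
    obtain ⟨k1, w⟩ := kv
    have hnm : k1 ∉ rest.map Prod.fst := (List.nodup_cons.mp (by simpa using hnd)).1
    have hrest : (rest.map Prod.fst).Nodup := (List.nodup_cons.mp (by simpa using hnd)).2
    simp only [List.foldl_cons]
    by_cases hk1 : k = k1
    · subst hk1
      rw [bInner_getD_not_mem rest k hnm, PySem.Dict.getD_insert_self]
      simp [PySem.Dict.contains, PySem.Dict.getD, PySem.Dict.get?_mk_cons]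
    · rw [ih hrest, PySem.Dict.getD_insert_of_ne _ _ _ hk1]
      simp only [PySem.Dict.contains, PySem.Dict.getD, PySem.Dict.get?_mk_cons,
        List.any_cons]
      have hb : (k1 == k) = false := beq_eq_false_iff_ne.mpr (Ne.symm hk1)
      rw [hb, Bool.false_or]
      simp

lemma bFold_getD (dicts : List (List (String × List String))) (k : String)
    (hpre : ∀ d ∈ dicts, (d.map Prod.fst).Nodup) (u : PySem.Dict String (List String)) :
    (dicts.foldl (fun u d =>
        d.foldl (fun u2 kv =>
          u2.insert kv.1 (PySem.Set.update (u2.getD kv.1 PySem.Set.empty) kv.2)) u) u).getD k PySem.Set.empty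
      = dicts.foldl (fun s d =>
          if (PySem.Dict.mk d).contains k then
            PySem.Set.update s ((PySem.Dict.mk d).getD k PySem.Set.empty)
          else s) (u.getD k PySem.Set.empty) := by
  induction dicts generalizing u with
  | nil => rfl
  | cons d ds ih =>
    simp only [List.foldl_cons]
    rw [ih (fun d hd => hpre d (List.mem_cons_of_mem _ hd)),
      bInner_getD d k (hpre d List.mem_cons_self)]

lemma bFold_keys (dicts : List (List (String × List String)))
    (u : PySem.Dict String (List String)) :
    (dicts.foldl (fun u d =>
        d.foldl (fun u2 kv =>
          u2.insert kv.1 (PySem.Set.update (u2.getD kv.1 PySem.Set.empty) kv.2)) u) u).keys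
      = dicts.foldl (fun s d => PySem.Set.union s (PySem.Dict.mk d).keys) u.keys := by
  induction dicts generalizing u with
  | nil => rfl
  | cons d ds ih =>
    simp only [List.foldl_cons]
    rw [ih, PySem.Dict.keys_foldl_insert_key d (fun kv => kv.1)
      (fun u2 kv => PySem.Set.update (u2.getD kv.1 PySem.Set.empty) kv.2) u]
    rfl

-- ===== VERDICT (by name: the statement is the Claim_ definition above) =====
theorem merge_ptr_dict_spec : Claim_equal_merge_ptr_dict := by
  intro dicts _ hpre
  unfold Spec_merge_ptr_dict merge_ptr_dict merge_ptr_dict_alt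
  by_cases h0 : dicts.length = 0
  · rw [List.length_eq_zero_iff] at h0; subst h0; rfl
  · rw [if_neg h0]
    dsimp only
    have hKnodup : (vK dicts).Nodup := vK_nodup dicts
    have hvk : dicts.foldl (fun s d => PySem.Set.union s (PySem.Dict.mk d).keys)
        PySem.Set.empty = vK dicts := rfl
    rw [hvk]
    have hAkeys :
        ((vK dicts).foldl (fun u key =>
          dicts.foldl (fun u2 d =>
            if (PySem.Dict.mk d).contains key then
              u2.modify key PySem.Set.empty
                (fun s => PySem.Set.update s ((PySem.Dict.mk d).getD key PySem.Set.empty))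
            else u2) (u.insert key PySem.Set.empty))
          (PySem.Dict.empty : PySem.Dict String (List String))).keys = vK dicts := by
      rw [aFold_keys]
      show PySem.Set.update [] (vK dicts) = vK dicts
      rw [PySem.Set.update_nil_left, PySem.Set.ofList_eq_self_of_nodup _ hKnodup]
    have hBkeys :
        (dicts.foldl (fun u d =>
            d.foldl (fun u2 kv =>
              u2.insert kv.1 (PySem.Set.update (u2.getD kv.1 PySem.Set.empty) kv.2)) u)
          (PySem.Dict.empty : PySem.Dict String (List String))).keys = vK dicts := by
      rw [bFold_keys]; rfl
    have hAnd :
        ((vK dicts).foldl (fun u key =>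
          dicts.foldl (fun u2 d =>
            if (PySem.Dict.mk d).contains key then
              u2.modify key PySem.Set.empty
                (fun s => PySem.Set.update s ((PySem.Dict.mk d).getD key PySem.Set.empty))
            else u2) (u.insert key PySem.Set.empty))
          (PySem.Dict.empty : PySem.Dict String (List String))).keys.Nodup := by
      rw [hAkeys]; exact hKnodup
    have hBnd :
        (dicts.foldl (fun u d =>
            d.foldl (fun u2 kv =>
              u2.insert kv.1 (PySem.Set.update (u2.getD kv.1 PySem.Set.empty) kv.2)) u)
          (PySem.Dict.empty : PySem.Dict String (List String))).keys.Nodup := by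
      rw [hBkeys]; exact hKnodup
    rw [PySem.Dict.items_eq_map_keys _ hAnd PySem.Set.empty,
      PySem.Dict.items_eq_map_keys _ hBnd PySem.Set.empty,
      hAkeys, hBkeys]
    apply List.map_congr_left
    intro k hk
    have h1 := aFold_getD dicts (vK dicts) k hKnodup hk PySem.Dict.empty
    have h2 := bFold_getD dicts k hpre PySem.Dict.empty
    rw [h1, h2]
    rfl
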